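-- pv_equiv track=rewrite | github.com/Kyuber1007/problemsolving | programmers/최고의집합.py | solution
-- ===== SOURCE A (Python) =====
-- def solution(n, s):
--     answer = []
--     if n > s:
--         return [-1]
--
--     while s != 0:
--         tem = s//n
--         answer.append(tem)
--         s -= tem
--         n -= 1
--     return answer
-- ===== SOURCE B (Python) =====
-- def solution(n, s):
--     if n > s:
--         return [-1]
--     if s == 0:
--         return []
--     q, r = divmod(s, n)
--     return [q] * (n - r) + [q + 1] * r
-- ===== Notes on version B (the rewrite author's own statement) =====
-- stated objective: simpler
-- what changed: Replaces A's greedy while-loop (one floor division and append per element) with a single divmod closed form q, r = divmod(s, n); [q]*(n-r) + [q+1]*r built by list repetition.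
import Mathlib
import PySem

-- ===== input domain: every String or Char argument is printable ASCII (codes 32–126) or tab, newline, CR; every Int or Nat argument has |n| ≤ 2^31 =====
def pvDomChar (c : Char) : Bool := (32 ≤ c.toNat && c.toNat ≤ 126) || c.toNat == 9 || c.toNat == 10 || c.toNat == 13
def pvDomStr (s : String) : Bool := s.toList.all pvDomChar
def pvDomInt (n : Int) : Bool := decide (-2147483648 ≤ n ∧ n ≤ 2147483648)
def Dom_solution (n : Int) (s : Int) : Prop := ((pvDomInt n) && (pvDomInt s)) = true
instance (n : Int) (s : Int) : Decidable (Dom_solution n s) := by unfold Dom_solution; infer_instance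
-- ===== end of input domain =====

-- B replaces A's greedy while-loop with a one-shot divmod closed form (simpler; same values).


-- ===== PORT A =====
-- A's while-loop; fuel n.toNat suffices on every input Pre_ admits (the loop runs at most n times there).
def solutionLoop : Nat → Int → Int → List Int
  | 0, _, _ => []
  | fuel+1, n, s =>
      if s ≠ 0 then
        let tem := PySem.Int.floordiv s n
        tem :: solutionLoop fuel (n - 1) (s - tem)
      else []

def solution (n : Int) (s : Int) : List Int :=
  if n > s then [-1] else solutionLoop n.toNat n s

-- ===== PORT B =====
def solution_alt (n : Int) (s : Int) : List Int :=
  if n > s then [-1]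
  else if s = 0 then []
  else
    let q := PySem.Int.floordiv s n
    let r := PySem.Int.mod s n
    List.replicate (n - r).toNat q ++ List.replicate r.toNat (q + 1)

-- ===== PRECONDITION & SPEC =====
-- Pre_ excludes exactly the inputs where A never returns: with n ≤ s, s ≠ 0 and n < 1 the Python A
-- either raises ZeroDivisionError (n hits 0 with s ≠ 0) or loops forever (negative n).
def Pre_solution (n : Int) (s : Int) : Prop := n > s ∨ s = 0 ∨ (1 ≤ n ∧ n ≤ s)
instance (n : Int) (s : Int) : Decidable (Pre_solution n s) := by unfold Pre_solution; infer_instance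
def pvWitness_solution : Int × Int := (3, 11)

def Spec_solution (n : Int) (s : Int) (out : List Int) : Prop := out = solution_alt n s
instance (n : Int) (s : Int) (out : List Int) : Decidable (Spec_solution n s out) := by unfold Spec_solution; infer_instance

-- ===== CLAIM (what is proved, stated in full; the proofs are below) =====
def Claim_equal_solution : Prop := ∀ (n : Int) (s : Int), Dom_solution n s → Pre_solution n s → Spec_solution n s (solution n s)

-- ===== LEMMAS AND PROOFS =====

-- A's loop, started at n = fuel ≥ 1 with fuel ≤ s, produces the closed-form multiset of B.
lemma solutionLoop_eq (fuel : Nat) : ∀ s : Int, 1 ≤ fuel → (fuel : Int) ≤ s →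
    solutionLoop fuel (fuel : Int) s =
      List.replicate (((fuel : Int) - s % (fuel : Int)).toNat) (s / (fuel : Int)) ++
      List.replicate ((s % (fuel : Int)).toNat) (s / (fuel : Int) + 1) := by
  induction fuel with
  | zero => intro s h; omega
  | succ k ih =>
    intro s _ hs
    have hkpos : (0 : Int) < (k : Int) + 1 := by positivity
    set b : Int := (k : Int) + 1 with hb
    have hσ : ((k + 1 : Nat) : Int) = b := by push_cast [hb]; ring
    have hsne : s ≠ 0 := by omega
    have hq : PySem.Int.floordiv s b = s / b := PySem.Int.floordiv_eq_ediv_of_pos hkpos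
    set q : Int := s / b with hqdef
    set r : Int := s % b with hrdef
    have hrange : 0 ≤ r ∧ r < b := ⟨Int.emod_nonneg s (by omega), Int.emod_lt_of_pos s hkpos⟩
    have hdecomp : r + b * q = s := by rw [hqdef, hrdef]; rw [add_comm]; exact Int.mul_ediv_add_emod s b
    have hq1 : 1 ≤ q := by
      by_contra hcon
      rw [not_le] at hcon
      nlinarith [hrange.1, hrange.2, hdecomp]
    simp only [solutionLoop, hσ, hsne, if_pos, hq, ne_eq, not_false_eq_true]
    by_cases hk0 : k = 0
    · -- n = 1 : the single step s // 1 = s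
      subst hk0
      have hb1 : b = 1 := by omega
      have hqs : q = s := by omega
      simp [solutionLoop, hb1, hqs]
    · -- n = k+1 ≥ 2 : one step, then the IH at (k, s - q)
      have hk1 : 1 ≤ k := Nat.one_le_iff_ne_zero.mpr hk0
      have hkI : (1 : Int) ≤ (k : Int) := by exact_mod_cast hk1
      have hrec : (k : Int) ≤ s - q := by nlinarith [hrange.1, hrange.2, hdecomp]
      have hbsub : b - 1 = (k : Int) := by omega
      rw [hbsub, ih (s - q) hk1 hrec]
      by_cases hr : r < (k : Int)
      · -- remainder survives: (s-q)/k = q, (s-q)%k = r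
        have huniq : (s - q) / (k : Int) = q ∧ (s - q) % (k : Int) = r :=
          (Int.ediv_emod_unique (by omega)).mpr ⟨by nlinarith [hdecomp], hrange.1, hr⟩
        rw [huniq.1, huniq.2]
        have hcount : (b - r).toNat = ((k : Int) - r).toNat + 1 := by omega
        rw [hcount, List.replicate_succ]
        simp [← hqdef, ← hrdef]
      · -- r = k : all child entries are q+1
        have hrk : r = (k : Int) := by omega
        have huniq : (s - q) / (k : Int) = q + 1 ∧ (s - q) % (k : Int) = 0 :=
          (Int.ediv_emod_unique (by omega)).mpr ⟨by nlinarith [hdecomp], le_refl 0, by omega⟩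
        rw [huniq.1, huniq.2]
        have h1 : (b - r).toNat = 1 := by omega
        have h2 : ((k : Int) - 0).toNat = r.toNat := by omega
        rw [← hqdef, ← hrdef, h1, hrk]
        simp

-- ===== VERDICT (by name: the statement is the Claim_ definition above) =====
theorem solution_spec : Claim_equal_solution := by
  intro n s _ hpre
  unfold Spec_solution solution solution_alt
  by_cases hgt : n > s
  · simp [hgt]
  · simp only [hgt, if_false]
    by_cases hs0 : s = 0
    · subst hs0
      cases h : n.toNat with
      | zero => simp [solutionLoop]
      | succ k => simp [solutionLoop]
    · have hn1 : 1 ≤ n := by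
        rcases hpre with h | h | h
        · exact absurd h hgt
        · exact absurd h hs0
        · exact h.1
      have hns : n ≤ s := not_lt.mp hgt
      have hcast : ((n.toNat : Int)) = n := Int.toNat_of_nonneg (by omega)
      have hf1 : 1 ≤ n.toNat := by omega
      have hfs : ((n.toNat : Int)) ≤ s := by omega
      have := solutionLoop_eq n.toNat s hf1 hfs
      rw [hcast] at this
      rw [this]
      simp only [hs0, if_false]
      rw [PySem.Int.floordiv_eq_ediv_of_pos (by omega), PySem.Int.mod_eq_emod_of_pos (by omega)]
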